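-- pv_equiv track=rewrite | github.com/mariolciax/Thue_online_play_gra_kombinatoryczna | apka.py | sprawdz_abelowo
-- ===== SOURCE A (Python) =====
-- def sprawdz_abelowo(slowo, alfabet):  # sprawdzanie repetycji abelowych juz w konkretnych podslowach
--     n = len(slowo)
--     p = int(n / 2)
--     a = len(alfabet)
--     wystapienia_1 = [0 * i for i in range(0, a)]
--     wystapienia_2 = [0 * i for i in range(0, a)]
--     for i in range(0, a):
--         for j in range(0, p):
--             if slowo[j] == alfabet[i]:
--                 wystapienia_1[i] = wystapienia_1[i] + 1
--         for k in range(p, n):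
--             if slowo[k] == alfabet[i]:
--                 wystapienia_2[i] = wystapienia_2[i] + 1  # a.count(x) liczba wystapien elementu x na liscie
--     for g in range(0, a):
--         if wystapienia_1[g] != wystapienia_2[g]:
--             return 0
--     return 1
-- ===== SOURCE B (Python) =====
-- def sprawdz_abelowo(slowo, alfabet):
--     p = len(slowo) // 2
--     first = sorted(c for c in slowo[:p] if c in alfabet)
--     second = sorted(c for c in slowo[p:] if c in alfabet)
--     return 1 if first == second else 0
-- ===== Notes on version B (the rewrite author's own statement) =====
-- stated objective: faster
-- what changed: Replaces the per-alphabet-letter nested counting loops over two occurrence tables with a filter of each half to alphabet letters followed by sort-and-compare multiset equality.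
import Mathlib
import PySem

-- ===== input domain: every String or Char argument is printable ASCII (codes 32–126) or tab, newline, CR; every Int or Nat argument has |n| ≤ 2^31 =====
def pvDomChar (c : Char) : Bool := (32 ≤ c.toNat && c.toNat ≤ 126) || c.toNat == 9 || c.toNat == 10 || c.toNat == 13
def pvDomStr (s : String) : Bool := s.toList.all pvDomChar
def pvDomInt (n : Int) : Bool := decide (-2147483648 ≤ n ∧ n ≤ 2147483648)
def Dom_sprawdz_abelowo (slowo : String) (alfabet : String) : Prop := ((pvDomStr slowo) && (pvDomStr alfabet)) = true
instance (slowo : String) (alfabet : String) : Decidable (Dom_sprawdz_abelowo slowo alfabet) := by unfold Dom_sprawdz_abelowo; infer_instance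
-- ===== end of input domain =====

-- B replaces A's per-letter counting tables by filtering each half to alphabet letters and
-- comparing the two sorted lists (multiset equality) — objective: faster (measured).

-- ===== PORT A =====
-- literal transliteration: two zero tables, nested counting loops (state threaded through folds),
-- final early-return scan (Option accumulator).  slowo[j] with 0 ≤ j < len is List.getElem?,
-- always `some`; int(n/2) on a Nat length is floor division n / 2.  range(p, n) is List.range' p (n - p).
def sprawdz_abelowo (slowo : String) (alfabet : String) : Int :=
  let s := slowo.toList
  let n := s.length
  let p := n / 2
  let al := alfabet.toList
  let a := al.length
  let w1 : List Int := (List.range a).map (fun i => 0 * (i : Int))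
  let w2 : List Int := (List.range a).map (fun i => 0 * (i : Int))
  let st := (List.range a).foldl (fun (st : List Int × List Int) i =>
      let st := (List.range p).foldl (fun (st : List Int × List Int) j =>
          if s[j]? = al[i]? then (st.1.set i (st.1.getD i 0 + 1), st.2) else st) st
      let st := (List.range' p (n - p)).foldl (fun (st : List Int × List Int) k =>
          if s[k]? = al[i]? then (st.1, st.2.set i (st.2.getD i 0 + 1)) else st) st
      st) (w1, w2)
  ((List.range a).foldl (fun (r : Option Int) g =>
      match r with
      | some v => some v
      | none => if st.1.getD g 0 ≠ st.2.getD g 0 then some 0 else none) none).getD 1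

-- ===== PORT B =====
-- `c in alfabet` for a single character is character membership; slowo[:p] / slowo[p:] with
-- 0 ≤ p ≤ len are List.take / List.drop; sorted(...) is PySem.List.sorted with identity key.
def sprawdz_abelowo_alt (slowo : String) (alfabet : String) : Int :=
  let s := slowo.toList
  let al := alfabet.toList
  let p := s.length / 2
  let first := PySem.List.sorted ((s.take p).filter (fun c => al.contains c)) (fun x => x) false
  let second := PySem.List.sorted ((s.drop p).filter (fun c => al.contains c)) (fun x => x) false
  if first = second then 1 else 0

-- ===== PRECONDITION & SPEC =====
def Spec_sprawdz_abelowo (slowo : String) (alfabet : String) (out : Int) : Prop := out = sprawdz_abelowo_alt slowo alfabet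
instance (slowo : String) (alfabet : String) (out : Int) : Decidable (Spec_sprawdz_abelowo slowo alfabet out) := by unfold Spec_sprawdz_abelowo; infer_instance

-- ===== CLAIM (what is proved, stated in full; the proofs are below) =====
def Claim_equal_sprawdz_abelowo : Prop := ∀ (slowo : String) (alfabet : String), Dom_sprawdz_abelowo slowo alfabet → Spec_sprawdz_abelowo slowo alfabet (sprawdz_abelowo slowo alfabet)

-- ===== LEMMAS AND PROOFS =====

-- the pair fold that only updates the first component
theorem pv_pairfold1 (P : Nat → Prop) [DecidablePred P] (i : Nat) (l : List Nat) (st : List Int × List Int) :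
    l.foldl (fun (st : List Int × List Int) j =>
        if P j then (st.1.set i (st.1.getD i 0 + 1), st.2) else st) st =
      (l.foldl (fun (w : List Int) j => if P j then w.set i (w.getD i 0 + 1) else w) st.1, st.2) := by
  induction l generalizing st with
  | nil => rfl
  | cons x xs ih => simp only [List.foldl_cons]; split_ifs <;> exact ih _

theorem pv_pairfold2 (P : Nat → Prop) [DecidablePred P] (i : Nat) (l : List Nat) (st : List Int × List Int) :
    l.foldl (fun (st : List Int × List Int) k =>
        if P k then (st.1, st.2.set i (st.2.getD i 0 + 1)) else st) st =
      (st.1, l.foldl (fun (w : List Int) k => if P k then w.set i (w.getD i 0 + 1) else w) st.2) := by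
  induction l generalizing st with
  | nil => rfl
  | cons x xs ih => simp only [List.foldl_cons]; split_ifs <;> exact ih _

theorem pv_setfold_length (P : Nat → Prop) [DecidablePred P] (i : Nat) (l : List Nat) (w : List Int) :
    (l.foldl (fun (w : List Int) j => if P j then w.set i (w.getD i 0 + 1) else w) w).length = w.length := by
  induction l generalizing w with
  | nil => rfl
  | cons x xs ih =>
    simp only [List.foldl_cons]
    split_ifs with hx
    · rw [ih]; exact List.length_set
    · exact ih w

-- counting fold: pointwise effect on getD
theorem pv_setfold_getD (P : Nat → Prop) [DecidablePred P] (i : Nat) (l : List Nat) (w : List Int)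
    (hi : i < w.length) (g : Nat) :
    (l.foldl (fun (w : List Int) j => if P j then w.set i (w.getD i 0 + 1) else w) w).getD g 0 =
      if g = i then w.getD g 0 + (l.countP (fun j => decide (P j)) : Int) else w.getD g 0 := by
  induction l generalizing w with
  | nil => simp
  | cons x xs ih =>
    simp only [List.foldl_cons, List.countP_cons]
    by_cases hx : P x
    · rw [if_pos hx, ih _ (by simpa using hi)]
      by_cases hg : g = i
      · subst hg
        rw [if_pos rfl, if_pos rfl]
        have hset : (w.set g (w.getD g 0 + 1)).getD g 0 = w.getD g 0 + 1 := by
          simp [List.getD_eq_getElem?_getD, List.getElem?_set_self hi]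
        rw [hset]
        simp only [hx, decide_true, if_true]
        push_cast; ring
      · rw [if_neg hg, if_neg hg]
        simp [List.getD_eq_getElem?_getD, List.getElem?_set_ne (fun h => hg h.symm)]
    · rw [if_neg hx, ih _ hi]
      simp [hx]

-- counting over an index range equals counting in the corresponding sublist
theorem pv_countP_range' (s : List Char) (c : Char) :
    ∀ (m q : Nat), (List.range' q m).countP (fun k => decide (s[k]? = some c)) =
      ((s.drop q).take m).count c := by
  intro m
  induction m with
  | zero => intro q; simp
  | succ m ih =>
    intro q
    rw [List.range'_succ, List.countP_cons]
    by_cases hq : q < s.length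
    · rw [List.drop_eq_getElem_cons hq, List.take_succ_cons, List.count_cons,
        ih (q + 1), List.getElem?_eq_getElem hq]
      simp [beq_iff_eq]
    · have h1 : s.drop q = [] := List.drop_eq_nil_of_le (by omega)
      have h2 : s.drop (q + 1) = [] := List.drop_eq_nil_of_le (by omega)
      have h3 : s[q]? = none := List.getElem?_eq_none (by omega)
      rw [ih (q + 1), h1, h2, h3]
      simp

-- the early-return scan: once `some`, it stays
theorem pv_optfold_some (q : Nat → Prop) [DecidablePred q] (l : List Nat) (v : Int) :
    l.foldl (fun (r : Option Int) g => match r with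
      | some v => some v
      | none => if q g then some 0 else none) (some v) = some v := by
  induction l with
  | nil => rfl
  | cons x xs ih => exact ih

theorem pv_optfold (q : Nat → Prop) [DecidablePred q] (l : List Nat) :
    l.foldl (fun (r : Option Int) g => match r with
      | some v => some v
      | none => if q g then some 0 else none) none =
      if ∃ g ∈ l, q g then some 0 else none := by
  induction l with
  | nil => simp
  | cons x xs ih =>
    rw [List.foldl_cons]
    by_cases hx : q x
    · rw [if_pos hx, pv_optfold_some, if_pos ⟨x, by simp, hx⟩]
    · rw [if_neg hx, ih]
      by_cases he : ∃ g ∈ xs, q g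
      · rcases he with ⟨g, hg, hqg⟩
        rw [if_pos ⟨g, hg, hqg⟩, if_pos ⟨g, by simp [hg], hqg⟩]
      · have hne : ¬ ∃ g ∈ x :: xs, q g := by
          rintro ⟨g, hg, hqg⟩
          rcases List.mem_cons.mp hg with h | h
          · exact hx (h ▸ hqg)
          · exact he ⟨g, h, hqg⟩
        rw [if_neg he, if_neg hne]

-- invariant of A's outer counting loop
theorem pv_outer (s al : List Char) (p n : Nat) (m : Nat) (hm : m ≤ al.length) :
    ((List.range m).foldl (fun (st : List Int × List Int) i =>
      (List.range' p (n - p)).foldl (fun (st : List Int × List Int) k =>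
          if s[k]? = al[i]? then (st.1, st.2.set i (st.2.getD i 0 + 1)) else st)
        ((List.range p).foldl (fun (st : List Int × List Int) j =>
          if s[j]? = al[i]? then (st.1.set i (st.1.getD i 0 + 1), st.2) else st) st))
      (List.replicate al.length (0 : Int), List.replicate al.length (0 : Int))).1.length = al.length ∧
    ((List.range m).foldl (fun (st : List Int × List Int) i =>
      (List.range' p (n - p)).foldl (fun (st : List Int × List Int) k =>
          if s[k]? = al[i]? then (st.1, st.2.set i (st.2.getD i 0 + 1)) else st)
        ((List.range p).foldl (fun (st : List Int × List Int) j =>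
          if s[j]? = al[i]? then (st.1.set i (st.1.getD i 0 + 1), st.2) else st) st))
      (List.replicate al.length (0 : Int), List.replicate al.length (0 : Int))).2.length = al.length ∧
    (∀ g : Nat, ((List.range m).foldl (fun (st : List Int × List Int) i =>
      (List.range' p (n - p)).foldl (fun (st : List Int × List Int) k =>
          if s[k]? = al[i]? then (st.1, st.2.set i (st.2.getD i 0 + 1)) else st)
        ((List.range p).foldl (fun (st : List Int × List Int) j =>
          if s[j]? = al[i]? then (st.1.set i (st.1.getD i 0 + 1), st.2) else st) st))
      (List.replicate al.length (0 : Int), List.replicate al.length (0 : Int))).1.getD g 0 =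
        if g < m then ((List.range p).countP (fun j => decide (s[j]? = al[g]?)) : Int) else 0) ∧
    (∀ g : Nat, ((List.range m).foldl (fun (st : List Int × List Int) i =>
      (List.range' p (n - p)).foldl (fun (st : List Int × List Int) k =>
          if s[k]? = al[i]? then (st.1, st.2.set i (st.2.getD i 0 + 1)) else st)
        ((List.range p).foldl (fun (st : List Int × List Int) j =>
          if s[j]? = al[i]? then (st.1.set i (st.1.getD i 0 + 1), st.2) else st) st))
      (List.replicate al.length (0 : Int), List.replicate al.length (0 : Int))).2.getD g 0 =
        if g < m then ((List.range' p (n - p)).countP (fun k => decide (s[k]? = al[g]?)) : Int) else 0) := by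
  induction m with
  | zero =>
    refine ⟨by simp, by simp, fun g => ?_, fun g => ?_⟩ <;>
      · simp only [List.range_zero, List.foldl_nil, Nat.not_lt_zero, if_false]
        by_cases hg : g < al.length
        · exact List.getD_replicate 0 hg
        · have hge : (List.replicate al.length (0 : Int)).length ≤ g := by
            rw [List.length_replicate]; omega
          rw [List.getD_eq_getElem?_getD, List.getElem?_eq_none hge]
          rfl
  | succ m ih =>
    have hm' : m ≤ al.length := by omega
    obtain ⟨ih1, ih2, ih3, ih4⟩ := ih hm'
    rw [List.range_succ, List.foldl_append, List.foldl_cons, List.foldl_nil]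
    rw [pv_pairfold1 (fun j => s[j]? = al[m]?) m (List.range p),
        pv_pairfold2 (fun k => s[k]? = al[m]?) m (List.range' p (n - p))]
    refine ⟨by rw [pv_setfold_length]; exact ih1, by rw [pv_setfold_length]; exact ih2,
      fun g => ?_, fun g => ?_⟩
    · rw [pv_setfold_getD _ _ _ _ (by rw [ih1]; omega) g]
      by_cases hg : g = m
      · subst hg
        rw [if_pos rfl, ih3 g, if_neg (by omega), if_pos (by omega), zero_add]
      · rw [if_neg hg, ih3 g]
        by_cases hlt : g < m
        · rw [if_pos hlt, if_pos (by omega)]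
        · rw [if_neg hlt, if_neg (by omega)]
    · rw [pv_setfold_getD _ _ _ _ (by rw [ih2]; omega) g]
      by_cases hg : g = m
      · subst hg
        rw [if_pos rfl, ih4 g, if_neg (by omega), if_pos (by omega), zero_add]
      · rw [if_neg hg, ih4 g]
        by_cases hlt : g < m
        · rw [if_pos hlt, if_pos (by omega)]
        · rw [if_neg hlt, if_neg (by omega)]

-- A computes: 1 iff every alphabet letter occurs equally often in the two halves
theorem pv_A_char (slowo alfabet : String) :
    sprawdz_abelowo slowo alfabet =
      if ∀ c ∈ alfabet.toList,
          (slowo.toList.take (slowo.toList.length / 2)).count c =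
          (slowo.toList.drop (slowo.toList.length / 2)).count c
      then 1 else 0 := by
  obtain ⟨h1, h2, h3, h4⟩ := pv_outer slowo.toList alfabet.toList
    (slowo.toList.length / 2) slowo.toList.length alfabet.toList.length (le_refl _)
  simp only [sprawdz_abelowo]
  rw [show (List.range alfabet.toList.length).map (fun i => 0 * (i : Int)) =
      List.replicate alfabet.toList.length (0 : Int) from by simp]
  rw [pv_optfold]
  have hC1 : ∀ g, g < alfabet.toList.length →
      ((List.range alfabet.toList.length).foldl (fun (st : List Int × List Int) i =>
        (List.range' (slowo.toList.length / 2) (slowo.toList.length - slowo.toList.length / 2)).foldl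
          (fun (st : List Int × List Int) k =>
            if slowo.toList[k]? = alfabet.toList[i]? then (st.1, st.2.set i (st.2.getD i 0 + 1)) else st)
          ((List.range (slowo.toList.length / 2)).foldl (fun (st : List Int × List Int) j =>
            if slowo.toList[j]? = alfabet.toList[i]? then (st.1.set i (st.1.getD i 0 + 1), st.2) else st) st))
        (List.replicate alfabet.toList.length (0 : Int), List.replicate alfabet.toList.length (0 : Int))).1.getD g 0 =
      (((slowo.toList.take (slowo.toList.length / 2)).count alfabet.toList[g]! : Nat) : Int) := by
    intro g hg
    rw [h3 g, if_pos hg, List.getElem?_eq_getElem hg, List.range_eq_range', pv_countP_range',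
      List.drop_zero, List.getElem!_eq_getElem?_getD, List.getElem?_eq_getElem hg]
    rfl
  have hdt : (slowo.toList.drop (slowo.toList.length / 2)).take
      (slowo.toList.length - slowo.toList.length / 2) = slowo.toList.drop (slowo.toList.length / 2) := by
    rw [← List.length_drop, List.take_length]
  have hC2 : ∀ g, g < alfabet.toList.length →
      ((List.range alfabet.toList.length).foldl (fun (st : List Int × List Int) i =>
        (List.range' (slowo.toList.length / 2) (slowo.toList.length - slowo.toList.length / 2)).foldl
          (fun (st : List Int × List Int) k =>
            if slowo.toList[k]? = alfabet.toList[i]? then (st.1, st.2.set i (st.2.getD i 0 + 1)) else st)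
          ((List.range (slowo.toList.length / 2)).foldl (fun (st : List Int × List Int) j =>
            if slowo.toList[j]? = alfabet.toList[i]? then (st.1.set i (st.1.getD i 0 + 1), st.2) else st) st))
        (List.replicate alfabet.toList.length (0 : Int), List.replicate alfabet.toList.length (0 : Int))).2.getD g 0 =
      (((slowo.toList.drop (slowo.toList.length / 2)).count alfabet.toList[g]! : Nat) : Int) := by
    intro g hg
    rw [h4 g, if_pos hg, List.getElem?_eq_getElem hg, pv_countP_range', hdt,
      List.getElem!_eq_getElem?_getD, List.getElem?_eq_getElem hg]
    rfl
  by_cases H : ∀ c ∈ alfabet.toList,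
      (slowo.toList.take (slowo.toList.length / 2)).count c =
      (slowo.toList.drop (slowo.toList.length / 2)).count c
  · rw [if_pos H, if_neg ?_]
    · rfl
    · rintro ⟨g, hg, hne⟩
      have hglt := List.mem_range.mp hg
      apply hne
      rw [hC1 g hglt, hC2 g hglt]
      have hmem : alfabet.toList[g]! ∈ alfabet.toList := by
        rw [List.getElem!_eq_getElem?_getD, List.getElem?_eq_getElem hglt]
        exact List.getElem_mem hglt
      exact_mod_cast H _ hmem
  · push Not at H
    obtain ⟨c, hc, hne⟩ := H
    obtain ⟨g, hglt, hgc⟩ := List.mem_iff_getElem.mp hc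
    have hnall : ¬ (∀ c ∈ alfabet.toList,
        (slowo.toList.take (slowo.toList.length / 2)).count c =
        (slowo.toList.drop (slowo.toList.length / 2)).count c) :=
      fun hall => hne (hall c hc)
    rw [if_neg hnall, if_pos ?_]
    · rfl
    · refine ⟨g, List.mem_range.mpr hglt, ?_⟩
      rw [hC1 g hglt, hC2 g hglt]
      have : alfabet.toList[g]! = c := by
        rw [List.getElem!_eq_getElem?_getD, List.getElem?_eq_getElem hglt]; exact hgc
      rw [this]
      exact fun h => hne (by exact_mod_cast h)

-- B computes the same characterisation
theorem pv_B_char (slowo alfabet : String) :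
    sprawdz_abelowo_alt slowo alfabet =
      if ∀ c ∈ alfabet.toList,
          (slowo.toList.take (slowo.toList.length / 2)).count c =
          (slowo.toList.drop (slowo.toList.length / 2)).count c
      then 1 else 0 := by
  simp only [sprawdz_abelowo_alt]
  by_cases H : ∀ c ∈ alfabet.toList,
      (slowo.toList.take (slowo.toList.length / 2)).count c =
      (slowo.toList.drop (slowo.toList.length / 2)).count c
  · have hperm : ((slowo.toList.take (slowo.toList.length / 2)).filter
        (fun c => alfabet.toList.contains c)).Perm
        ((slowo.toList.drop (slowo.toList.length / 2)).filter
        (fun c => alfabet.toList.contains c)) := by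
      rw [List.perm_iff_count]
      intro c
      by_cases hc : alfabet.toList.contains c
      · rw [List.count_filter hc, List.count_filter hc]
        exact H c (by simpa using hc)
      · rw [List.count_eq_zero.mpr (fun hmem => hc (List.mem_filter.mp hmem).2),
          List.count_eq_zero.mpr (fun hmem => hc (List.mem_filter.mp hmem).2)]
    rw [if_pos ((PySem.List.sorted_id_eq_sorted_id_iff_perm _ _).mpr hperm), if_pos H]
  · rw [if_neg H, if_neg ?_]
    intro heq
    apply H
    intro c hc
    have hc' : alfabet.toList.contains c := by simpa using hc
    have hcnt := List.perm_iff_count.mp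
      ((PySem.List.sorted_id_eq_sorted_id_iff_perm _ _).mp heq) c
    rwa [List.count_filter hc', List.count_filter hc'] at hcnt

-- ===== VERDICT (by name: the statement is the Claim_ definition above) =====
theorem sprawdz_abelowo_spec : Claim_equal_sprawdz_abelowo := by
  intro slowo alfabet _
  unfold Spec_sprawdz_abelowo
  rw [pv_A_char, pv_B_char]
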